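-- pv_equiv track=rewrite | github.com/chakiAunkit/Text2SQL-Memory-Agent | core_logic/text2sql_chatbot.py | _categorize_memories
-- ===== SOURCE A (Python) =====
-- from typing import Dict, List, Optional, Any, Tuple
--
-- def _categorize_memories(memories: List[str]) -> Tuple[List[str], List[str], List[str], List[str]]:
--     """Categorize memories by type tag."""
--     preferences, terminology, metrics, entities = [], [], [], []
--     for m in memories:
--         if '[PREFERENCE]' in m:
--             preferences.append(m.replace('[PREFERENCE]', '').strip())
--         elif '[TERM]' in m:
--             terminology.append(m.replace('[TERM]', '').strip())
--         elif '[METRIC]' in m: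
--             metrics.append(m.replace('[METRIC]', '').strip())
--         elif '[ENTITY]' in m:
--             entities.append(m.replace('[ENTITY]', '').strip())
--     return preferences, terminology, metrics, entities
-- ===== SOURCE B (Python) =====
-- _TAGS = ['[PREFERENCE]', '[TERM]', '[METRIC]', '[ENTITY]']
--
-- def _first_tag(m):
--     for t in _TAGS:
--         if t in m:
--             return t
--     return None
--
-- def _categorize_memories(memories):
--     def bucket(tag):
--         return [m.replace(tag, '').strip() for m in memories if _first_tag(m) == tag]
--     return (bucket('[PREFERENCE]'), bucket('[TERM]'),
--             bucket('[METRIC]'), bucket('[ENTITY]'))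
-- ===== Notes on version B (the rewrite author's own statement) =====
-- stated objective: idiomatic
-- what changed: Replaces the single loop with four mutable accumulators by a tag classifier (_first_tag) plus one filter-map comprehension per bucket; the four buckets are built independently instead of by in-place appends.
import Mathlib
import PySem

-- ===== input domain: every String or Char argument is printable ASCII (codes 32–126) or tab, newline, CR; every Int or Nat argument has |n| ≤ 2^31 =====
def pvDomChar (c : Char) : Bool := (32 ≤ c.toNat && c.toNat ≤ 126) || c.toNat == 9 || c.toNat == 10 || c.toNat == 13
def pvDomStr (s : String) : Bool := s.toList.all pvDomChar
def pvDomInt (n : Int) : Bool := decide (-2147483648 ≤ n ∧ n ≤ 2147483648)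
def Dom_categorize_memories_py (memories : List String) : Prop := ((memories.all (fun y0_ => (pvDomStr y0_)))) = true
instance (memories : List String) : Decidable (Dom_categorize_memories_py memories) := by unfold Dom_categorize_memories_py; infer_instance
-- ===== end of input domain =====

-- B replaces the four-accumulator loop by a tag classifier plus one filter-map pass per bucket (idiomatic decomposition; same cost).
-- ===== PORT A =====
-- the loop body of A (one if/elif chain appending to the matching bucket)
def pvStepA (acc : List String × List String × List String × List String) (m : String) :
    List String × List String × List String × List String :=
  let (preferences, terminology, metrics, entities) := acc
  if PySem.Str.isIn "[PREFERENCE]" m then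
    (preferences ++ [PySem.Str.strip (PySem.Str.replace m "[PREFERENCE]" "")], terminology, metrics, entities)
  else if PySem.Str.isIn "[TERM]" m then
    (preferences, terminology ++ [PySem.Str.strip (PySem.Str.replace m "[TERM]" "")], metrics, entities)
  else if PySem.Str.isIn "[METRIC]" m then
    (preferences, terminology, metrics ++ [PySem.Str.strip (PySem.Str.replace m "[METRIC]" "")], entities)
  else if PySem.Str.isIn "[ENTITY]" m then
    (preferences, terminology, metrics, entities ++ [PySem.Str.strip (PySem.Str.replace m "[ENTITY]" "")])
  else (preferences, terminology, metrics, entities)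

def categorize_memories_py (memories : List String) : List String × List String × List String × List String :=
  memories.foldl pvStepA ([], [], [], [])

-- ===== PORT B =====
def pvTags : List String := ["[PREFERENCE]", "[TERM]", "[METRIC]", "[ENTITY]"]

-- first tag of _TAGS occurring in m (early-return for-loop of Source B, as structural recursion)
def pvFirstTagAux (ts : List String) (m : String) : Option String :=
  match ts with
  | [] => none
  | t :: rest => if PySem.Str.isIn t m then some t else pvFirstTagAux rest m

def pvFirstTag (m : String) : Option String := pvFirstTagAux pvTags m

-- the comprehension [m.replace(tag,'').strip() for m in memories if _first_tag(m) == tag]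
def pvBucket (memories : List String) (tag : String) : List String :=
  (memories.filter (fun m => pvFirstTag m == some tag)).map
    (fun m => PySem.Str.strip (PySem.Str.replace m tag ""))

def categorize_memories_py_alt (memories : List String) : List String × List String × List String × List String :=
  (pvBucket memories "[PREFERENCE]", pvBucket memories "[TERM]",
   pvBucket memories "[METRIC]", pvBucket memories "[ENTITY]")

-- ===== PRECONDITION & SPEC =====
def Spec_categorize_memories_py (memories : List String) (out : List String × List String × List String × List String) : Prop := out = categorize_memories_py_alt memories
instance (memories : List String) (out : List String × List String × List String × List String) : Decidable (Spec_categorize_memories_py memories out) := by unfold Spec_categorize_memories_py; infer_instance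

-- ===== CLAIM (what is proved, stated in full; the proofs are below) =====
def Claim_equal_categorize_memories_py : Prop := ∀ (memories : List String), Dom_categorize_memories_py memories → Spec_categorize_memories_py memories (categorize_memories_py memories)

-- ===== LEMMAS AND PROOFS =====
-- pvFirstTag unfolded on the literal tag list
theorem pvFirstTag_eq (m : String) :
    pvFirstTag m =
      if PySem.Str.isIn "[PREFERENCE]" m then some "[PREFERENCE]"
      else if PySem.Str.isIn "[TERM]" m then some "[TERM]"
      else if PySem.Str.isIn "[METRIC]" m then some "[METRIC]"
      else if PySem.Str.isIn "[ENTITY]" m then some "[ENTITY]"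
      else none := rfl

theorem pvBucket_cons (m : String) (ms : List String) (tag : String) :
    pvBucket (m :: ms) tag =
      (if pvFirstTag m == some tag then [PySem.Str.strip (PySem.Str.replace m tag "")] else [])
        ++ pvBucket ms tag := by
  by_cases hp : (pvFirstTag m == some tag) = true
  · simp only [pvBucket, List.filter_cons, hp, if_true, List.map_cons, List.singleton_append]
  · simp only [pvBucket, List.filter_cons, hp, if_false, List.nil_append, Bool.false_eq_true]

theorem pvBucket_cons_eq (m : String) (ms : List String) (tag : String)
    (hf : (pvFirstTag m == some tag) = true) :
    pvBucket (m :: ms) tag = PySem.Str.strip (PySem.Str.replace m tag "") :: pvBucket ms tag := by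
  rw [pvBucket_cons, if_pos hf, List.singleton_append]

theorem pvBucket_cons_ne (m : String) (ms : List String) (tag : String)
    (hf : (pvFirstTag m == some tag) = false) :
    pvBucket (m :: ms) tag = pvBucket ms tag := by
  rw [pvBucket_cons, if_neg (by simp [hf]), List.nil_append]

-- Loop invariant: A's foldl from any accumulator appends exactly B's buckets.
theorem pv_invariant (memories : List String) (p t me e : List String) :
    memories.foldl pvStepA (p, t, me, e)
    = (p ++ pvBucket memories "[PREFERENCE]", t ++ pvBucket memories "[TERM]",
       me ++ pvBucket memories "[METRIC]", e ++ pvBucket memories "[ENTITY]") := by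
  induction memories generalizing p t me e with
  | nil => simp [pvBucket]
  | cons m ms ih =>
    rw [List.foldl_cons]
    by_cases h1 : PySem.Str.isIn "[PREFERENCE]" m = true
    · have hf : pvFirstTag m = some "[PREFERENCE]" := by rw [pvFirstTag_eq, if_pos h1]
      rw [show pvStepA (p, t, me, e) m
            = (p ++ [PySem.Str.strip (PySem.Str.replace m "[PREFERENCE]" "")], t, me, e) by
          simp only [pvStepA]; rw [if_pos h1]]
      rw [ih, pvBucket_cons_eq m ms _ (by rw [hf]; rfl),
          pvBucket_cons_ne m ms "[TERM]" (by rw [hf]; rfl),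
          pvBucket_cons_ne m ms "[METRIC]" (by rw [hf]; rfl),
          pvBucket_cons_ne m ms "[ENTITY]" (by rw [hf]; rfl),
          List.append_assoc, List.singleton_append]
    · by_cases h2 : PySem.Str.isIn "[TERM]" m = true
      · have hf : pvFirstTag m = some "[TERM]" := by rw [pvFirstTag_eq, if_neg h1, if_pos h2]
        rw [show pvStepA (p, t, me, e) m
              = (p, t ++ [PySem.Str.strip (PySem.Str.replace m "[TERM]" "")], me, e) by
            simp only [pvStepA]; rw [if_neg h1, if_pos h2]]
        rw [ih, pvBucket_cons_ne m ms "[PREFERENCE]" (by rw [hf]; rfl),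
            pvBucket_cons_eq m ms _ (by rw [hf]; rfl),
            pvBucket_cons_ne m ms "[METRIC]" (by rw [hf]; rfl),
            pvBucket_cons_ne m ms "[ENTITY]" (by rw [hf]; rfl),
            List.append_assoc, List.singleton_append]
      · by_cases h3 : PySem.Str.isIn "[METRIC]" m = true
        · have hf : pvFirstTag m = some "[METRIC]" := by
            rw [pvFirstTag_eq, if_neg h1, if_neg h2, if_pos h3]
          rw [show pvStepA (p, t, me, e) m
                = (p, t, me ++ [PySem.Str.strip (PySem.Str.replace m "[METRIC]" "")], e) by
              simp only [pvStepA]; rw [if_neg h1, if_neg h2, if_pos h3]]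
          rw [ih, pvBucket_cons_ne m ms "[PREFERENCE]" (by rw [hf]; rfl),
              pvBucket_cons_ne m ms "[TERM]" (by rw [hf]; rfl),
              pvBucket_cons_eq m ms _ (by rw [hf]; rfl),
              pvBucket_cons_ne m ms "[ENTITY]" (by rw [hf]; rfl),
              List.append_assoc, List.singleton_append]
        · by_cases h4 : PySem.Str.isIn "[ENTITY]" m = true
          · have hf : pvFirstTag m = some "[ENTITY]" := by
              rw [pvFirstTag_eq, if_neg h1, if_neg h2, if_neg h3, if_pos h4]
            rw [show pvStepA (p, t, me, e) m
                  = (p, t, me, e ++ [PySem.Str.strip (PySem.Str.replace m "[ENTITY]" "")]) by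
                simp only [pvStepA]; rw [if_neg h1, if_neg h2, if_neg h3, if_pos h4]]
            rw [ih, pvBucket_cons_ne m ms "[PREFERENCE]" (by rw [hf]; rfl),
                pvBucket_cons_ne m ms "[TERM]" (by rw [hf]; rfl),
                pvBucket_cons_ne m ms "[METRIC]" (by rw [hf]; rfl),
                pvBucket_cons_eq m ms _ (by rw [hf]; rfl),
                List.append_assoc, List.singleton_append]
          · have hf : pvFirstTag m = none := by
              rw [pvFirstTag_eq, if_neg h1, if_neg h2, if_neg h3, if_neg h4]
            rw [show pvStepA (p, t, me, e) m = (p, t, me, e) by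
                simp only [pvStepA]; rw [if_neg h1, if_neg h2, if_neg h3, if_neg h4]]
            rw [ih, pvBucket_cons_ne m ms "[PREFERENCE]" (by rw [hf]; rfl),
                pvBucket_cons_ne m ms "[TERM]" (by rw [hf]; rfl),
                pvBucket_cons_ne m ms "[METRIC]" (by rw [hf]; rfl),
                pvBucket_cons_ne m ms "[ENTITY]" (by rw [hf]; rfl)]

-- ===== VERDICT (by name: the statement is the Claim_ definition above) =====
theorem categorize_memories_py_spec : Claim_equal_categorize_memories_py := by
  intro memories _
  unfold Spec_categorize_memories_py categorize_memories_py categorize_memories_py_alt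
  simpa using pv_invariant memories [] [] [] []
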